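-- pv_equiv track=rewrite | github.com/generalaimodels/DSA | test/test5.py | max_rectangle_of_zero
-- ===== SOURCE A (Python) =====
-- def max_rectangle_of_zero(matrix: list[list[int]]):
--     if not matrix or not matrix[0]:
--         return 0
--     n, m = len(matrix), len(matrix[0])
--     heights = [0] * m
--     max_area = 0
--
--     def largest_histogram_area(heights: list[int]):
--         stack = []
--         max_area = 0
--         heights.append(0)
--         for i , h in enumerate(heights):
--             while stack and heights[stack[-1]] > h:
--                 height = heights[stack.pop()]
--                 width = i if not stack else i - stack[-1] -1
--                 max_area = max(max_area, height*width)
--             stack.append(i)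
--         heights.pop()
--         return max_area
--
--     for i in range(n):
--         for j in range(m):
--             if matrix[i][j] == 0:
--                 heights[j] += 1
--             else:
--                 heights[j] = 0
--         max_area = max(max_area, largest_histogram_area(heights))
--     return max_area
-- ===== SOURCE B (Python) =====
-- def max_rectangle_of_zero(matrix: list[list[int]]):
--     if not matrix or not matrix[0]:
--         return 0
--     m = len(matrix[0])
--     heights = [0] * m
--     best = 0
--     for row in matrix:
--         heights = [h + 1 if x == 0 else 0 for h, x in zip(heights, row)]
--         for a in range(m):
--             mn = heights[a]
--             for b in range(a, m):
--                 mn = min(mn, heights[b])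
--                 best = max(best, mn * (b - a + 1))
--     return best
-- ===== Notes on version B (the rewrite author's own statement) =====
-- stated objective: simpler
-- what changed: Replaced the monotonic-stack largest-histogram subroutine with a direct scan over all column intervals keeping a running minimum, and replaced the indexed height-update loop with a zip comprehension over each row.
import Mathlib
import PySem

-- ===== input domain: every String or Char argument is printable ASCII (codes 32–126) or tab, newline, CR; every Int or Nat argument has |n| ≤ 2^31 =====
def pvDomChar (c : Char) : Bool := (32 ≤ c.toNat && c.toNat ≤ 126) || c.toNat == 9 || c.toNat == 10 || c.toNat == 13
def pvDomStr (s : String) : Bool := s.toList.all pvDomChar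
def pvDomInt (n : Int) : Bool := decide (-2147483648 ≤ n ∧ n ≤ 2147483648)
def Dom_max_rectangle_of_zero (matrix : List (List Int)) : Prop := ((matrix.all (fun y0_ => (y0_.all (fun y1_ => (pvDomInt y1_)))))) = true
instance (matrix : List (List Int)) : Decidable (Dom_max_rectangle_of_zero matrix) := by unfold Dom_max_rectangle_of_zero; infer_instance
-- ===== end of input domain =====

-- B replaces A's monotonic-stack histogram subroutine by a direct scan of all column
-- intervals with a running minimum (simpler code, no stack; equal return values).

-- ===== PORT A =====
-- the inner while-loop of largest_histogram_area: stack kept top-first; all index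
-- reads are in range under Pre_, so List.getD is exact there
def pvPopAll (hs : List Int) (i : Nat) : List Nat → Int → List Nat × Int
  | [], ma => ([], ma)
  | q :: s, ma =>
    if hs.getD q 0 > hs.getD i 0 then
      let width : Int := match s with | [] => (i : Int) | p :: _ => (i : Int) - (p : Int) - 1
      pvPopAll hs i s (max ma (hs.getD q 0 * width))
    else (q :: s, ma)

-- largest_histogram_area: Python appends 0, loops over enumerate, pops the appended 0
def pvHistArea (heights : List Int) : Int :=
  let hs := heights ++ [0]
  ((List.range hs.length).foldl (fun st i =>
      let r := pvPopAll hs i st.1 st.2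
      (i :: r.1, r.2)) (([] : List Nat), (0 : Int))).2

def max_rectangle_of_zero (matrix : List (List Int)) : Int :=
  if matrix = [] ∨ matrix.headD [] = [] then 0
  else
    let n := matrix.length
    let m := (matrix.headD []).length
    ((List.range n).foldl (fun (st : List Int × Int) i =>
        let heights := (List.range m).foldl (fun l j =>
            if (matrix.getD i []).getD j 0 = 0 then l.set j (l.getD j 0 + 1)
            else l.set j 0) st.1
        (heights, max st.2 (pvHistArea heights))) (List.replicate m 0, (0 : Int))).2

-- ===== PORT B =====
-- inner two loops of Source B: for each start column a, scan b rightwards with running min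
def pvBruteHist (h : List Int) : Int :=
  (List.range h.length).foldl (fun best a =>
    ((List.range' a (h.length - a)).foldl (fun (p : Int × Int) b =>
        let mn := min p.1 (h.getD b 0)
        (mn, max p.2 (mn * ((b : Int) - (a : Int) + 1)))) (h.getD a 0, best)).2) 0

def max_rectangle_of_zero_alt (matrix : List (List Int)) : Int :=
  if matrix = [] ∨ matrix.headD [] = [] then 0
  else
    let m := (matrix.headD []).length
    (matrix.foldl (fun (st : List Int × Int) row =>
        let heights := List.zipWith (fun hv x => if x = 0 then hv + 1 else 0) st.1 row
        (heights, max st.2 (pvBruteHist heights))) (List.replicate m 0, (0 : Int))).2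

-- ===== PRECONDITION & SPEC =====
-- Pre_ excludes exactly the ragged matrices in which some row is shorter than the first
-- row: there A's matrix[i][j] raises IndexError (and B raises there as well).
def Pre_max_rectangle_of_zero (matrix : List (List Int)) : Prop :=
  ∀ row ∈ matrix, (matrix.headD []).length ≤ row.length
instance (matrix : List (List Int)) : Decidable (Pre_max_rectangle_of_zero matrix) := by
  unfold Pre_max_rectangle_of_zero; infer_instance

def pvWitness_max_rectangle_of_zero : List (List Int) := [[0, 0, 1], [0, 0, 0], [1, 0, 0]]

def Spec_max_rectangle_of_zero (matrix : List (List Int)) (out : Int) : Prop := out = max_rectangle_of_zero_alt matrix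
instance (matrix : List (List Int)) (out : Int) : Decidable (Spec_max_rectangle_of_zero matrix out) := by unfold Spec_max_rectangle_of_zero; infer_instance

-- ===== CLAIM (what is proved, stated in full; the proofs are below) =====
def Claim_equal_max_rectangle_of_zero : Prop := ∀ (matrix : List (List Int)), Dom_max_rectangle_of_zero matrix → Pre_max_rectangle_of_zero matrix → Spec_max_rectangle_of_zero matrix (max_rectangle_of_zero matrix)

-- ===== LEMMAS AND PROOFS =====

-- pvH h c : the histogram with the appended sentinel 0, as a total function on indices
def pvH (h : List Int) (c : Nat) : Int := (h ++ [0]).getD c 0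

-- minimum of h over the index interval [a, b] (meaningful for a ≤ b < h.length)
def pvMin (h : List Int) (a b : Nat) : Int :=
  ((List.range' (a + 1) (b - a)).map (fun c => h.getD c 0)).foldl min (h.getD a 0)

-- area of the maximal rectangle of base [a, b] in histogram h
def pvArea (h : List Int) (a b : Nat) : Int := pvMin h a b * ((b : Int) - (a : Int) + 1)

-- the common characterisation: x is the maximum of 0 and all interval areas of h
def pvP (h : List Int) (x : Int) : Prop :=
  0 ≤ x ∧ (∀ a b, a ≤ b → b < h.length → pvArea h a b ≤ x) ∧
    (x = 0 ∨ ∃ a b, a ≤ b ∧ b < h.length ∧ pvArea h a b = x)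

-- "a is strictly above the stack top" (vacuously true for the empty stack)
def pvAbove (s : List Nat) (a : Nat) : Prop := match s with | [] => True | t :: _ => t < a

-- loop invariant of A's row loop over the histogram hs = h ++ [0]
def pvStInv (h : List Int) (i : Nat) (s : List Nat) (ma : Int) : Prop :=
  s.Pairwise (· > ·) ∧ (∀ q ∈ s, q < i) ∧
  (∀ j, j < i → (j ∈ s ↔ ∀ c, j < c → c < i → pvH h j ≤ pvH h c)) ∧
  0 ≤ ma ∧ (ma = 0 ∨ ∃ a b, a ≤ b ∧ b < h.length ∧ pvArea h a b = ma) ∧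
  (∀ a b, a ≤ b → b < h.length → b < i →
    (∃ c, b < c ∧ c < i ∧ pvH h c < pvMin h a b) → pvArea h a b ≤ ma)

theorem pvH_lt (h : List Int) (c : Nat) (hc : c < h.length) : pvH h c = h.getD c 0 := by
  unfold pvH
  exact List.getD_append _ _ _ _ hc

theorem pvH_len (h : List Int) : pvH h h.length = 0 := by
  unfold pvH
  simp [List.getD_eq_getElem?_getD]

theorem pvMin_self (h : List Int) (a : Nat) : pvMin h a a = h.getD a 0 := by
  simp [pvMin]

theorem pvMin_succ (h : List Int) (a b : Nat) (hab : a ≤ b) :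
    pvMin h a (b + 1) = min (pvMin h a b) (h.getD (b + 1) 0) := by
  unfold pvMin
  have h1 : b + 1 - a = (b - a) + 1 := by omega
  have h2 : a + 1 + (b - a) = b + 1 := by omega
  rw [h1, List.range'_1_concat, h2, List.map_append, List.foldl_append]
  simp

theorem pvMin_le (h : List Int) (a b c : Nat) (hac : a ≤ c) (hcb : c ≤ b) :
    pvMin h a b ≤ h.getD c 0 := by
  obtain ⟨k, rfl⟩ := Nat.exists_eq_add_of_le (le_trans hac hcb)
  revert hac hcb
  induction k generalizing c with
  | zero =>
    intro hac hcb
    have : c = a := by omega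
    subst this; rw [Nat.add_zero, pvMin_self]
  | succ k ih =>
    intro hac hcb
    rw [show a + (k + 1) = (a + k) + 1 from rfl, pvMin_succ h a (a + k) (by omega)]
    rcases Nat.lt_or_ge c (a + k + 1) with hc | hc
    · exact le_trans (min_le_left _ _) (ih c hac (by omega))
    · have : c = a + k + 1 := by omega
      subst this; exact min_le_right _ _

theorem pvLe_min (h : List Int) (a b : Nat) (x : Int) (hab : a ≤ b)
    (hx : ∀ c, a ≤ c → c ≤ b → x ≤ h.getD c 0) : x ≤ pvMin h a b := by
  obtain ⟨k, rfl⟩ := Nat.exists_eq_add_of_le hab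
  clear hab
  revert hx
  induction k with
  | zero =>
    intro hx
    rw [Nat.add_zero, pvMin_self]; exact hx a le_rfl le_rfl
  | succ k ih =>
    intro hx
    rw [show a + (k + 1) = (a + k) + 1 from rfl, pvMin_succ h a (a + k) (by omega)]
    refine le_min (ih ?_) (hx _ (by omega) le_rfl)
    intro c h1 h2; exact hx c h1 (by omega)

theorem pvMin_mono (h : List Int) (a b b' : Nat) (hab : a ≤ b) (hbb : b ≤ b') :
    pvMin h a b' ≤ pvMin h a b := by
  obtain ⟨k, rfl⟩ := Nat.exists_eq_add_of_le hbb
  clear hbb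
  induction k with
  | zero => exact le_rfl
  | succ k ih =>
    calc pvMin h a (b + (k + 1)) ≤ pvMin h a (b + k) := by
          rw [show b + (k + 1) = (b + k) + 1 from rfl,
            pvMin_succ h a (b + k) (by omega)]
          exact min_le_left _ _
      _ ≤ pvMin h a b := ih

theorem pvP_unique (h : List Int) (x y : Int) (hx : pvP h x) (hy : pvP h y) : x = y := by
  obtain ⟨hx0, hx1, hx2⟩ := hx
  obtain ⟨hy0, hy1, hy2⟩ := hy
  refine le_antisymm ?_ ?_
  · rcases hx2 with rfl | ⟨a, b, hab, hb, rfl⟩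
    · exact hy0
    · exact hy1 a b hab hb
  · rcases hy2 with rfl | ⟨a, b, hab, hb, rfl⟩
    · exact hx0
    · exact hx1 a b hab hb

-- named forms of B's inner/outer folds (proof-side only; equal to the port by rfl)
def pvIStep (h : List Int) (a : Nat) (p : Int × Int) (b : Nat) : Int × Int :=
  let mn := min p.1 (h.getD b 0)
  (mn, max p.2 (mn * ((b : Int) - (a : Int) + 1)))

def pvIFold (h : List Int) (a k : Nat) (best : Int) : Int × Int :=
  (List.range' a k).foldl (pvIStep h a) (h.getD a 0, best)

def pvOFold (h : List Int) (nn : Nat) : Int :=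
  (List.range nn).foldl (fun best a => (pvIFold h a (h.length - a) best).2) 0

theorem pvBruteHist_eq (h : List Int) : pvBruteHist h = pvOFold h h.length := rfl

theorem pvIFold_concat (h : List Int) (a k : Nat) (best : Int) :
    pvIFold h a (k + 1) best = pvIStep h a (pvIFold h a k best) (a + k) := by
  unfold pvIFold
  rw [List.range'_1_concat, List.foldl_append, List.foldl_cons, List.foldl_nil]

theorem pvInner (h : List Int) (a : Nat) (best : Int) :
    ∀ k, 1 ≤ k → a + k ≤ h.length →
    (pvIFold h a k best).1 = pvMin h a (a + k - 1) ∧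
    best ≤ (pvIFold h a k best).2 ∧
    (∀ b, a ≤ b → b < a + k → pvArea h a b ≤ (pvIFold h a k best).2) ∧
    ((pvIFold h a k best).2 = best ∨
      ∃ b, a ≤ b ∧ b < a + k ∧ pvArea h a b = (pvIFold h a k best).2) := by
  intro k
  induction k with
  | zero => omega
  | succ k ih =>
    intro _ hkL
    rcases Nat.eq_zero_or_pos k with rfl | hk1
    · -- single step: the interval [a, a]
      have e : pvIFold h a 1 best
          = (h.getD a 0, max best (h.getD a 0 * ((a : Int) - (a : Int) + 1))) := by
        unfold pvIFold pvIStep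
        simp [List.range'_one]
      rw [e]
      refine ⟨by rw [Nat.add_sub_cancel, pvMin_self], le_max_left _ _, ?_, ?_⟩
      · intro b h1 h2
        have hba : a = b := by omega
        subst hba
        have e2 : pvArea h a a = h.getD a 0 * ((a : Int) - (a : Int) + 1) := by
          rw [pvArea, pvMin_self]
        rw [e2]; exact le_max_right _ _
      · rcases max_choice best (h.getD a 0 * ((a : Int) - (a : Int) + 1)) with hc | hc
        · exact Or.inl hc
        · refine Or.inr ⟨a, le_rfl, by omega, ?_⟩
          rw [pvArea, pvMin_self, hc]
    · obtain ⟨hA, hB, hC, hD⟩ := ih hk1 (by omega)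
      rw [pvIFold_concat]
      set r := pvIFold h a k best with hr
      have hfst : (pvIStep h a r (a + k)).1 = min r.1 (h.getD (a + k) 0) := rfl
      have hmin : min r.1 (h.getD (a + k) 0) = pvMin h a (a + k) := by
        have hs := pvMin_succ h a (a + k - 1) (by omega)
        rw [show a + k - 1 + 1 = a + k by omega] at hs
        rw [hA, ← hs]
      have hsnd : (pvIStep h a r (a + k)).2
          = max r.2 (min r.1 (h.getD (a + k) 0) * ((a + k : Nat) - (a : Int) + 1)) := rfl
      have harea : pvArea h a (a + k) = min r.1 (h.getD (a + k) 0) * ((a + k : Nat) - (a : Int) + 1) := by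
        rw [pvArea, ← hmin]
      refine ⟨by rw [show a + (k + 1) - 1 = a + k by omega, hfst]; exact hmin, ?_, ?_, ?_⟩
      · rw [hsnd]; exact le_trans hB (le_max_left _ _)
      · intro b h1 h2
        rw [hsnd]
        rcases Nat.lt_or_ge b (a + k) with hb | hb
        · exact le_trans (hC b h1 hb) (le_max_left _ _)
        · have : b = a + k := by omega
          subst this
          rw [harea]
          exact le_max_right _ _
      · rw [hsnd]
        rcases max_choice r.2 (min r.1 (h.getD (a + k) 0) * ((a + k : Nat) - (a : Int) + 1)) with hc | hc
        · rw [hc]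
          rcases hD with hD | ⟨b, h1, h2, h3⟩
          · exact Or.inl hD
          · exact Or.inr ⟨b, h1, by omega, h3⟩
        · rw [hc]
          exact Or.inr ⟨a + k, by omega, by omega, harea⟩

theorem pvOuter (h : List Int) :
    ∀ nn, nn ≤ h.length →
    0 ≤ pvOFold h nn ∧
    (∀ a b, a < nn → a ≤ b → b < h.length → pvArea h a b ≤ pvOFold h nn) ∧
    (pvOFold h nn = 0 ∨ ∃ a b, a ≤ b ∧ b < h.length ∧ pvArea h a b = pvOFold h nn) := by
  intro nn
  induction nn with
  | zero =>
    intro _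
    refine ⟨le_rfl, ?_, Or.inl rfl⟩
    intro a b h1 _ _
    omega
  | succ nn ih =>
    intro hnn
    obtain ⟨h0, h1, h2⟩ := ih (by omega)
    have e : pvOFold h (nn + 1) = (pvIFold h nn (h.length - nn) (pvOFold h nn)).2 := by
      unfold pvOFold
      rw [List.range_succ, List.foldl_append, List.foldl_cons, List.foldl_nil]
    rw [e]
    obtain ⟨_, iB, iC, iD⟩ := pvInner h nn (pvOFold h nn) (h.length - nn) (by omega) (by omega)
    refine ⟨le_trans h0 iB, ?_, ?_⟩
    · intro a b ha hab hb
      rcases Nat.lt_or_ge a nn with ha' | ha'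
      · exact le_trans (h1 a b ha' hab hb) iB
      · have : a = nn := by omega
        subst this
        exact iC b hab (by omega)
    · rcases iD with iD | ⟨b, hb1, hb2, hb3⟩
      · rw [iD]
        exact h2
      · exact Or.inr ⟨nn, b, hb1, by omega, hb3⟩

theorem pvBrute_P (h : List Int) : pvP h (pvBruteHist h) := by
  obtain ⟨h0, h1, h2⟩ := pvOuter h h.length le_rfl
  rw [pvBruteHist_eq]
  exact ⟨h0, fun a b hab hb => h1 a b (by omega) hab hb, h2⟩

-- named forms of A's histogram fold (proof-side only; equal to the port by rfl)
def pvHStep (hs : List Int) (st : List Nat × Int) (i : Nat) : List Nat × Int :=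
  let r := pvPopAll hs i st.1 st.2
  (i :: r.1, r.2)

def pvHFold (hs : List Int) (k : Nat) : List Nat × Int :=
  (List.range k).foldl (pvHStep hs) (([] : List Nat), (0 : Int))

theorem pvHistArea_eq (h : List Int) :
    pvHistArea h = (pvHFold (h ++ [0]) (h ++ [0]).length).2 := rfl

-- forward direction of the stack-membership characterisation
theorem pv_up (h : List Int) (i : Nat) (S : List Nat)
    (hchar : ∀ j, j < i → (j ∈ S ↔ ∀ c, j < c → c < i → pvH h j ≤ pvH h c))
    (q : Nat) (hq : q ∈ S) (hqi : q < i) :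
    ∀ c, q ≤ c → c < i → pvH h q ≤ pvH h c := by
  intro c h1 h2
  rcases eq_or_lt_of_le h1 with rfl | h1
  · exact le_rfl
  · exact (hchar q hqi).1 hq c h1 h2

-- no index strictly between two adjacent members of a strictly decreasing list is a member
theorem pv_notin_between (S : List Nat) (hpw : S.Pairwise (· > ·)) (q p : Nat)
    (t1 t2 : List Nat) (hS : S = t1 ++ q :: p :: t2) (c : Nat)
    (hc1 : p < c) (hc2 : c < q) : c ∉ S := by
  subst hS
  intro hmem
  rcases List.mem_append.mp hmem with hmem | hmem
  · have := (List.pairwise_append.mp hpw).2.2 c hmem q (by simp)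
    omega
  · have hpw2 := (List.pairwise_append.mp hpw).2.1
    rcases List.mem_cons.mp hmem with rfl | hmem
    · omega
    · rcases List.mem_cons.mp hmem with rfl | hmem
      · omega
      · have := (List.pairwise_cons.mp (List.pairwise_cons.mp hpw2).2).1 c hmem
        omega

-- no index below the last member of a strictly decreasing list is a member
theorem pv_notin_bot (S : List Nat) (hpw : S.Pairwise (· > ·)) (q : Nat)
    (t1 : List Nat) (hS : S = t1 ++ [q]) (c : Nat) (hc : c < q) : c ∉ S := by
  subst hS
  intro hmem
  rcases List.mem_append.mp hmem with hmem | hmem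
  · have := (List.pairwise_append.mp hpw).2.2 c hmem q (by simp)
    omega
  · simp at hmem
    omega

-- the "gap" fact: members dominate every index down to the next member below them
theorem pv_gap (h : List Int) (i : Nat) (S : List Nat)
    (hchar : ∀ j, j < i → (j ∈ S ↔ ∀ c, j < c → c < i → pvH h j ≤ pvH h c))
    (q : Nat) (hq : q ∈ S) (hqi : q < i)
    (lo : Nat) (hnotin : ∀ c, lo ≤ c → c < q → c ∉ S) :
    ∀ c, lo ≤ c → c < q → pvH h q ≤ pvH h c := by
  have hup := pv_up h i S hchar q hq hqi
  have main : ∀ k, ∀ c, q - c ≤ k → lo ≤ c → c < q → pvH h q ≤ pvH h c := by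
    intro k
    induction k with
    | zero => intro c h1 h2 h3; omega
    | succ k ih =>
      intro c h1 h2 h3
      have hcs : c ∉ S := hnotin c h2 h3
      have hci : c < i := by omega
      have hex : ∃ d, c < d ∧ d < i ∧ pvH h d < pvH h c := by
        by_contra hno
        push Not at hno
        exact hcs ((hchar c hci).2 (fun d hd1 hd2 => hno d hd1 hd2))
      obtain ⟨d, hd1, hd2, hd3⟩ := hex
      rcases Nat.lt_or_ge d q with hdq | hdq
      · exact le_of_lt (lt_of_le_of_lt (ih d (by omega) (by omega) hdq) hd3)
      · exact le_of_lt (lt_of_le_of_lt (hup d hdq hd2) hd3)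
  intro c h1 h2
  exact main (q - c) c le_rfl h1 h2

-- the popped rectangle is exactly the interval [p', i-1], whose minimum is the popped bar
theorem pv_popmin (h : List Int) (i : Nat) (hi : i ≤ h.length) (S : List Nat)
    (hchar : ∀ j, j < i → (j ∈ S ↔ ∀ c, j < c → c < i → pvH h j ≤ pvH h c))
    (q : Nat) (hq : q ∈ S) (hqi : q < i) (p' : Nat) (hp'q : p' ≤ q)
    (hnotin : ∀ c, p' ≤ c → c < q → c ∉ S) : pvMin h p' (i - 1) = pvH h q := by
  have hgap := pv_gap h i S hchar q hq hqi p' hnotin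
  have hup := pv_up h i S hchar q hq hqi
  refine le_antisymm ?_ ?_
  · rw [pvH_lt h q (by omega)]
    exact pvMin_le h p' (i - 1) q hp'q (by omega)
  · apply pvLe_min h p' (i - 1) _ (by omega)
    intro c h1 h2
    rw [← pvH_lt h c (by omega)]
    rcases Nat.lt_or_ge c q with hc | hc
    · exact hgap c h1 hc
    · exact hup c hc (by omega)

-- intervals [a, i-1] starting inside the popped span are dominated by the popped rectangle
theorem pv_cover_new (h : List Int) (i : Nat) (hi : i ≤ h.length) (q p' : Nat)
    (hqi : q < i) (ma2 : Int) (hma20 : 0 ≤ ma2) (hpop : pvH h q * ((i : Int) - (p' : Int)) ≤ ma2)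
    (a : Nat) (ha1 : p' ≤ a) (ha2 : a ≤ q) : pvArea h a (i - 1) ≤ ma2 := by
  have hm0q : pvMin h a (i - 1) ≤ pvH h q := by
    rw [pvH_lt h q (by omega)]
    exact pvMin_le h a (i - 1) q ha2 (by omega)
  have hw : (0 : Int) ≤ ((i - 1 : Nat) : Int) - (a : Int) + 1 := by omega
  by_cases hm0 : pvMin h a (i - 1) ≤ 0
  · refine le_trans ?_ hma20
    calc pvMin h a (i - 1) * (((i - 1 : Nat) : Int) - (a : Int) + 1)
        ≤ 0 * (((i - 1 : Nat) : Int) - (a : Int) + 1) := mul_le_mul_of_nonneg_right hm0 hw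
      _ = 0 := by ring
  · push Not at hm0
    rw [pvArea]
    refine le_trans (mul_le_mul hm0q (by omega) hw (le_trans (le_of_lt hm0) hm0q)) hpop

theorem pvPopAll_spec (h : List Int) (i : Nat) (hi : i ≤ h.length) (S : List Nat)
    (hSpw : S.Pairwise (· > ·)) (hSlt : ∀ q ∈ S, q < i)
    (hchar : ∀ j, j < i → (j ∈ S ↔ ∀ c, j < c → c < i → pvH h j ≤ pvH h c)) :
    ∀ (s : List Nat) (ma : Int), s.IsSuffix S → 0 ≤ ma →
    (ma = 0 ∨ ∃ a b, a ≤ b ∧ b < h.length ∧ pvArea h a b = ma) →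
    (∀ a, a < i → pvAbove s a → pvH h i < pvMin h a (i - 1) → pvArea h a (i - 1) ≤ ma) →
    (pvPopAll (h ++ [0]) i s ma).1.IsSuffix s ∧
    (∀ j, j ∈ (pvPopAll (h ++ [0]) i s ma).1 ↔ j ∈ s ∧ pvH h j ≤ pvH h i) ∧
    ma ≤ (pvPopAll (h ++ [0]) i s ma).2 ∧ 0 ≤ (pvPopAll (h ++ [0]) i s ma).2 ∧
    ((pvPopAll (h ++ [0]) i s ma).2 = 0 ∨
      ∃ a b, a ≤ b ∧ b < h.length ∧ pvArea h a b = (pvPopAll (h ++ [0]) i s ma).2) ∧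
    (∀ a, a < i → pvAbove (pvPopAll (h ++ [0]) i s ma).1 a →
      pvH h i < pvMin h a (i - 1) → pvArea h a (i - 1) ≤ (pvPopAll (h ++ [0]) i s ma).2) := by
  intro s
  induction s with
  | nil =>
    intro ma hsuf hma0 hmaw hcov
    simp only [pvPopAll]
    exact ⟨List.suffix_rfl, by simp, le_rfl, hma0, hmaw, hcov⟩
  | cons q rest ih =>
    intro ma hsuf hma0 hmaw hcov
    have hqS : q ∈ S := hsuf.subset List.mem_cons_self
    have hqi : q < i := hSlt q hqS
    have hspw : (q :: rest).Pairwise (· > ·) := hSpw.sublist hsuf.sublist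
    by_cases hqh : pvH h q > pvH h i
    · -- pop q, recurse
      have hqh' : (h ++ [0]).getD q 0 > (h ++ [0]).getD i 0 := hqh
      rcases rest with _ | ⟨p, t⟩
      · -- q is the bottom of the stack: width = i
        simp only [pvPopAll, if_pos hqh']
        have hnotin : ∀ c, 0 ≤ c → c < q → c ∉ S := by
          obtain ⟨t1, ht1⟩ := hsuf
          intro c _ hc
          exact pv_notin_bot S hSpw q t1 ht1.symm c hc
        have hqmin := pv_popmin h i hi S hchar q hqS hqi 0 (by omega) hnotin
        have hpoparea : pvArea h 0 (i - 1) = pvH h q * (i : Int) := by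
          rw [pvArea, hqmin]
          have e1 : ((i - 1 : Nat) : Int) = (i : Int) - 1 := by omega
          rw [e1]
          push_cast
          ring
        have hma20 : (0 : Int) ≤ max ma (pvH h q * (i : Int)) :=
          le_trans hma0 (le_max_left _ _)
        have hmaw2 : max ma (pvH h q * (i : Int)) = 0 ∨
            ∃ a b, a ≤ b ∧ b < h.length ∧ pvArea h a b = max ma (pvH h q * (i : Int)) := by
          rcases max_choice ma (pvH h q * (i : Int)) with hc | hc
          · rw [hc]; exact hmaw
          · rw [hc]; exact Or.inr ⟨0, i - 1, by omega, by omega, hpoparea⟩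
        have hcov2 : ∀ a, a < i → pvAbove ([] : List Nat) a →
            pvH h i < pvMin h a (i - 1) →
            pvArea h a (i - 1) ≤ max ma (pvH h q * (i : Int)) := by
          intro a ha _ hlt
          rcases Nat.lt_or_ge q a with hqa | haq
          · exact le_trans (hcov a ha hqa hlt) (le_max_left _ _)
          · refine pv_cover_new h i hi q 0 hqi _ hma20 ?_ a (by omega) haq
            have : ((i : Int) - ((0 : Nat) : Int)) = (i : Int) := by omega
            rw [this]
            exact le_max_right _ _
        obtain ⟨r1, r2, r3, r4, r5, r6⟩ :=
          ih (max ma (pvH h q * (i : Int))) List.nil_suffix hma20 hmaw2 hcov2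
        simp only [pvPopAll, pvH] at r1 r2 r3 r4 r5 r6
        refine ⟨r1.trans (List.suffix_cons q []), ?_,
          le_trans (le_max_left _ _) r3, r4, r5, r6⟩
        intro j
        rw [r2 j]
        constructor
        · rintro ⟨hj, hj2⟩
          exact ⟨List.mem_cons_of_mem _ hj, hj2⟩
        · rintro ⟨hj, hj2⟩
          rcases List.mem_cons.mp hj with rfl | hj'
          · exact absurd hj2 (not_le.mpr hqh)
          · exact ⟨hj', hj2⟩
      · -- q pops onto p: width = i - p - 1
        simp only [pvPopAll, if_pos hqh']
        have hpq : p < q := (List.pairwise_cons.mp hspw).1 p List.mem_cons_self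
        have hnotin : ∀ c, p + 1 ≤ c → c < q → c ∉ S := by
          obtain ⟨t1, ht1⟩ := hsuf
          intro c hc1 hc2
          exact pv_notin_between S hSpw q p t1 t ht1.symm c (by omega) hc2
        have hqmin := pv_popmin h i hi S hchar q hqS hqi (p + 1) (by omega) hnotin
        have hpoparea : pvArea h (p + 1) (i - 1) = pvH h q * ((i : Int) - (p : Int) - 1) := by
          rw [pvArea, hqmin]
          have e1 : ((i - 1 : Nat) : Int) = (i : Int) - 1 := by omega
          rw [e1]
          push_cast
          ring
        have hma20 : (0 : Int) ≤ max ma (pvH h q * ((i : Int) - (p : Int) - 1)) :=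
          le_trans hma0 (le_max_left _ _)
        have hmaw2 : max ma (pvH h q * ((i : Int) - (p : Int) - 1)) = 0 ∨
            ∃ a b, a ≤ b ∧ b < h.length ∧
              pvArea h a b = max ma (pvH h q * ((i : Int) - (p : Int) - 1)) := by
          rcases max_choice ma (pvH h q * ((i : Int) - (p : Int) - 1)) with hc | hc
          · rw [hc]; exact hmaw
          · rw [hc]; exact Or.inr ⟨p + 1, i - 1, by omega, by omega, hpoparea⟩
        have hsuf' : (p :: t).IsSuffix S := (List.suffix_cons q (p :: t)).trans hsuf
        have hcov2 : ∀ a, a < i → pvAbove (p :: t) a →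
            pvH h i < pvMin h a (i - 1) →
            pvArea h a (i - 1) ≤ max ma (pvH h q * ((i : Int) - (p : Int) - 1)) := by
          intro a ha hab hlt
          rcases Nat.lt_or_ge q a with hqa | haq
          · exact le_trans (hcov a ha hqa hlt) (le_max_left _ _)
          · have hpa : p < a := hab
            refine pv_cover_new h i hi q (p + 1) hqi _ hma20 ?_ a (by omega) haq
            have : ((i : Int) - ((p + 1 : Nat) : Int)) = (i : Int) - (p : Int) - 1 := by omega
            rw [this]
            exact le_max_right _ _
        obtain ⟨r1, r2, r3, r4, r5, r6⟩ :=
          ih (max ma (pvH h q * ((i : Int) - (p : Int) - 1))) hsuf' hma20 hmaw2 hcov2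
        simp only [pvPopAll, pvH] at r1 r2 r3 r4 r5 r6
        refine ⟨r1.trans (List.suffix_cons q (p :: t)), ?_,
          le_trans (le_max_left _ _) r3, r4, r5, r6⟩
        intro j
        rw [r2 j]
        constructor
        · rintro ⟨hj, hj2⟩
          exact ⟨List.mem_cons_of_mem _ hj, hj2⟩
        · rintro ⟨hj, hj2⟩
          rcases List.mem_cons.mp hj with rfl | hj'
          · exact absurd hj2 (not_le.mpr hqh)
          · exact ⟨hj', hj2⟩
    · -- no pop: the stack and max are unchanged
      have hqh' : ¬ ((h ++ [0]).getD q 0 > (h ++ [0]).getD i 0) := hqh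
      simp only [pvPopAll, if_neg hqh']
      refine ⟨List.suffix_rfl, ?_, le_rfl, hma0, hmaw, hcov⟩
      intro j
      constructor
      · intro hj
        refine ⟨hj, ?_⟩
        rcases List.mem_cons.mp hj with rfl | hj'
        · exact not_lt.mp hqh
        · have hjq : j < q := (List.pairwise_cons.mp hspw).1 j hj'
          have hjS : j ∈ S := hsuf.subset hj
          have := pv_up h i S hchar j hjS (by omega) q (le_of_lt hjq) hqi
          exact le_trans this (not_lt.mp hqh)
      · exact fun hj => hj.1

theorem pvStInv_step (h : List Int) (i : Nat) (hi : i ≤ h.length) (s : List Nat) (ma : Int)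
    (hinv : pvStInv h i s ma) :
    pvStInv h (i + 1) (i :: (pvPopAll (h ++ [0]) i s ma).1) ((pvPopAll (h ++ [0]) i s ma).2) := by
  obtain ⟨hpw, hlt, hchar, hma0, hmaw, hclosed⟩ := hinv
  have hcov : ∀ a, a < i → pvAbove s a → pvH h i < pvMin h a (i - 1) →
      pvArea h a (i - 1) ≤ ma := by
    intro a ha hab _
    exfalso
    have hmem : (i - 1) ∈ s :=
      (hchar (i - 1) (by omega)).2 (by intro c h1 h2; exact absurd h2 (by omega))
    rcases s with _ | ⟨t, ts⟩
    · simp at hmem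
    · have hti : t < i := hlt t List.mem_cons_self
      have ht : t = i - 1 := by
        rcases List.mem_cons.mp hmem with he | hmem'
        · omega
        · have := (List.pairwise_cons.mp hpw).1 _ hmem'
          omega
      have hta : t < a := hab
      omega
  obtain ⟨r1, r2, r3, r4, r5, r6⟩ :=
    pvPopAll_spec h i hi s hpw hlt hchar s ma List.suffix_rfl hma0 hmaw hcov
  refine ⟨?_, ?_, ?_, r4, r5, ?_⟩
  · refine List.pairwise_cons.mpr ⟨?_, hpw.sublist r1.sublist⟩
    intro j hj
    exact hlt j ((r2 j).1 hj).1
  · intro q hq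
    rcases List.mem_cons.mp hq with rfl | hq'
    · omega
    · have := hlt q ((r2 q).1 hq').1
      omega
  · intro j hj
    rcases Nat.lt_or_ge j i with hji | hji
    · constructor
      · intro hjm c hc1 hc2
        have hj2 : j ∈ (pvPopAll (h ++ [0]) i s ma).1 := by
          rcases List.mem_cons.mp hjm with rfl | hjm'
          · omega
          · exact hjm'
        obtain ⟨hjs, hjle⟩ := (r2 j).1 hj2
        rcases Nat.lt_or_ge c i with hci | hci
        · exact (hchar j hji).1 hjs c hc1 hci
        · have : c = i := by omega
          subst this
          exact hjle
      · intro hall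
        refine List.mem_cons_of_mem _ ((r2 j).2 ⟨(hchar j hji).2 ?_, hall i hji (by omega)⟩)
        intro c h1 h2
        exact hall c h1 (by omega)
    · have : j = i := by omega
      subst this
      constructor
      · intro _ c h1 h2
        exact absurd h2 (by omega)
      · intro _
        exact List.mem_cons_self
  · intro a b hab hbL hbi hex
    obtain ⟨c, hc1, hc2, hc3⟩ := hex
    rcases Nat.lt_or_ge c i with hci | hci
    · exact le_trans (hclosed a b hab hbL (by omega) ⟨c, hc1, hci, hc3⟩) r3
    · have hceq : c = i := by omega
      subst hceq
      by_cases hex2 : ∃ e, b < e ∧ e < c ∧ pvH h e < pvMin h a b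
      · exact le_trans (hclosed a b hab hbL (by omega) hex2) r3
      · push Not at hex2
        have hmm : pvMin h a (c - 1) = pvMin h a b := by
          refine le_antisymm (pvMin_mono h a b (c - 1) hab (by omega)) ?_
          apply pvLe_min h a (c - 1) _ (by omega)
          intro e he1 he2
          rcases Nat.lt_or_ge b e with hbe | heb
          · rw [← pvH_lt h e (by omega)]
            exact hex2 e hbe (by omega)
          · exact pvMin_le h a b e he1 heb
        have hup : pvAbove (pvPopAll (h ++ [0]) c s ma).1 a := by
          rcases hr : (pvPopAll (h ++ [0]) c s ma).1 with _ | ⟨t, ts⟩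
          · simp [pvAbove]
          · show t < a
            by_contra hta
            push Not at hta
            have htm : t ∈ (pvPopAll (h ++ [0]) c s ma).1 := by
              rw [hr]; exact List.mem_cons_self
            obtain ⟨hts, htle⟩ := (r2 t).1 htm
            have hti : t < c := hlt t hts
            have hmt : pvMin h a (c - 1) ≤ pvH h t := by
              rw [pvH_lt h t (by omega)]
              exact pvMin_le h a (c - 1) t hta (by omega)
            rw [hmm] at hmt
            exact absurd (lt_of_le_of_lt (le_trans hmt htle) hc3) (lt_irrefl _)
        by_cases hm0 : pvMin h a b ≤ 0
        · have hw : (0 : Int) ≤ (b : Int) - (a : Int) + 1 := by omega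
          calc pvArea h a b = pvMin h a b * ((b : Int) - (a : Int) + 1) := rfl
            _ ≤ 0 * ((b : Int) - (a : Int) + 1) := mul_le_mul_of_nonneg_right hm0 hw
            _ = 0 := by ring
            _ ≤ _ := r4
        · push Not at hm0
          have hr6 := r6 a (by omega) hup (by rw [hmm]; exact hc3)
          refine le_trans ?_ hr6
          rw [pvArea, pvArea, hmm]
          refine mul_le_mul_of_nonneg_left ?_ (le_of_lt hm0)
          omega

theorem pvHFold_inv (h : List Int) : ∀ k, k ≤ h.length + 1 →
    pvStInv h k (pvHFold (h ++ [0]) k).1 (pvHFold (h ++ [0]) k).2 := by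
  intro k
  induction k with
  | zero =>
    intro _
    have e : pvHFold (h ++ [0]) 0 = ([], 0) := rfl
    rw [e]
    exact ⟨List.Pairwise.nil, by simp, fun j hj => absurd hj (by omega), le_rfl, Or.inl rfl,
      fun a b _ _ hb _ => absurd hb (by omega)⟩
  | succ k ih =>
    intro hk
    have e : pvHFold (h ++ [0]) (k + 1) = pvHStep (h ++ [0]) (pvHFold (h ++ [0]) k) k := by
      unfold pvHFold
      rw [List.range_succ, List.foldl_append, List.foldl_cons, List.foldl_nil]
    rw [e]
    exact pvStInv_step h k (by omega) (pvHFold (h ++ [0]) k).1 (pvHFold (h ++ [0]) k).2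
      (ih (by omega))

theorem pvHist_P (h : List Int) : pvP h (pvHistArea h) := by
  have hlen : (h ++ [0]).length = h.length + 1 := by simp
  obtain ⟨_, _, _, hma0, hmaw, hclosed⟩ := pvHFold_inv h (h.length + 1) le_rfl
  have e : pvHistArea h = (pvHFold (h ++ [0]) (h.length + 1)).2 := by
    rw [pvHistArea_eq, hlen]
  rw [e]
  refine ⟨hma0, ?_, hmaw⟩
  intro a b hab hbL
  by_cases hm0 : pvMin h a b ≤ 0
  · have hw : (0 : Int) ≤ (b : Int) - (a : Int) + 1 := by omega
    calc pvArea h a b = pvMin h a b * ((b : Int) - (a : Int) + 1) := rfl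
      _ ≤ 0 * ((b : Int) - (a : Int) + 1) := mul_le_mul_of_nonneg_right hm0 hw
      _ = 0 := by ring
      _ ≤ _ := hma0
  · push Not at hm0
    refine hclosed a b hab hbL (by omega) ⟨h.length, by omega, by omega, ?_⟩
    rw [pvH_len]
    exact hm0

theorem pvHist_eq_brute (h : List Int) : pvHistArea h = pvBruteHist h :=
  pvP_unique h _ _ (pvHist_P h) (pvBrute_P h)

-- named forms of the two per-row steps (proof-side only; equal to the ports by rfl)
def pvGA (m : Nat) (st : List Int × Int) (row : List Int) : List Int × Int :=
  let heights := (List.range m).foldl (fun l j =>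
      if row.getD j 0 = 0 then l.set j (l.getD j 0 + 1) else l.set j 0) st.1
  (heights, max st.2 (pvHistArea heights))

def pvGB (st : List Int × Int) (row : List Int) : List Int × Int :=
  let heights := List.zipWith (fun hv x => if x = 0 then hv + 1 else 0) st.1 row
  (heights, max st.2 (pvBruteHist heights))

-- A's indexed read-modify-write loop builds the zipWith prefix position by position
theorem pvRowAux (row l : List Int) :
    ∀ k, k ≤ l.length → l.length ≤ row.length →
    (List.range k).foldl (fun (l' : List Int) j =>
        if row.getD j 0 = 0 then l'.set j (l'.getD j 0 + 1) else l'.set j 0) l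
      = List.zipWith (fun hv x => if x = 0 then hv + 1 else 0) (l.take k) (row.take k)
          ++ l.drop k := by
  intro k
  induction k with
  | zero => intro _ _; simp
  | succ k ih =>
    intro hk hlr
    rw [List.range_succ, List.foldl_append, List.foldl_cons, List.foldl_nil, ih (by omega) hlr]
    have hkl : k < l.length := by omega
    have hkr : k < row.length := by omega
    have hZlen : (List.zipWith (fun hv x => if x = 0 then hv + 1 else 0)
        (l.take k) (row.take k)).length = k := by
      rw [List.length_zipWith, List.length_take, List.length_take]
      omega
    have hdrop : l.drop k = l[k] :: l.drop (k + 1) := List.drop_eq_getElem_cons hkl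
    have hgetD : (List.zipWith (fun hv x => if x = 0 then hv + 1 else 0)
        (l.take k) (row.take k) ++ l.drop k).getD k 0 = l[k] := by
      rw [List.getD_append_right _ _ _ _ (by omega), hZlen, Nat.sub_self, hdrop,
        List.getD_cons_zero]
    have hset : ∀ v : Int, (List.zipWith (fun hv x => if x = 0 then hv + 1 else 0)
          (l.take k) (row.take k) ++ l.drop k).set k v
        = List.zipWith (fun hv x => if x = 0 then hv + 1 else 0)
            (l.take k) (row.take k) ++ (v :: l.drop (k + 1)) := by
      intro v
      rw [List.set_append, if_neg (by omega), hZlen, Nat.sub_self, hdrop, List.set_cons_zero]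
    have hTake : List.zipWith (fun hv x => if x = 0 then hv + 1 else 0)
          (l.take (k + 1)) (row.take (k + 1))
        = List.zipWith (fun hv x => if x = 0 then hv + 1 else 0)
            (l.take k) (row.take k) ++ [if row[k] = 0 then l[k] + 1 else 0] := by
      rw [List.take_add_one, List.take_add_one, List.getElem?_eq_getElem hkl,
        List.getElem?_eq_getElem hkr]
      rw [List.zipWith_append (by rw [List.length_take, List.length_take]; omega)]
      rfl
    have hrowk : row.getD k 0 = row[k] := List.getD_eq_getElem row 0 hkr
    by_cases hc : row.getD k 0 = 0
    · rw [if_pos hc, hgetD, hset, hTake]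
      rw [List.append_cons]
      congr 1
      congr 1
      rw [← hrowk, if_pos hc]
    · rw [if_neg hc, hset, hTake]
      rw [List.append_cons]
      congr 1
      congr 1
      rw [← hrowk, if_neg hc]

-- zipWith ignores the part of the second list beyond the first's length
theorem pvZipTrunc (f : Int → Int → Int) :
    ∀ (l row : List Int), List.zipWith f l (row.take l.length) = List.zipWith f l row := by
  intro l
  induction l with
  | nil => intro row; simp
  | cons x l ih =>
    intro row
    cases row with
    | nil => simp
    | cons y row => simp [ih row]

theorem pvGA_eq_GB (m : Nat) (st : List Int × Int) (row : List Int)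
    (h1 : st.1.length = m) (h2 : m ≤ row.length) : pvGA m st row = pvGB st row := by
  unfold pvGA pvGB
  have hr := pvRowAux row st.1 m (le_of_eq h1.symm) (by omega)
  rw [← h1] at hr
  rw [h1] at hr
  have e : (List.range m).foldl (fun (l' : List Int) j =>
        if row.getD j 0 = 0 then l'.set j (l'.getD j 0 + 1) else l'.set j 0) st.1
      = List.zipWith (fun hv x => if x = 0 then hv + 1 else 0) st.1 row := by
    rw [hr, ← h1, List.take_length, List.drop_length, List.append_nil, pvZipTrunc]
  rw [e]
  dsimp only
  rw [pvHist_eq_brute]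

-- a fold over range (length M) indexing into M is the fold over M
theorem pvFoldRange {σ β : Type} (g : σ → β → σ) (d : β) :
    ∀ (M : List β) (st : σ),
    (List.range M.length).foldl (fun st i => g st (M.getD i d)) st = M.foldl g st := by
  intro M
  induction M with
  | nil => intro st; rfl
  | cons r M ih =>
    intro st
    rw [List.length_cons, List.range_succ_eq_map, List.foldl_cons, List.foldl_map]
    simp only [List.getD_cons_zero, List.getD_cons_succ]
    exact ih (g st r)

theorem pvRows (m : Nat) : ∀ (rows : List (List Int)) (st : List Int × Int),
    st.1.length = m → (∀ r ∈ rows, m ≤ r.length) →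
    rows.foldl (pvGA m) st = rows.foldl pvGB st := by
  intro rows
  induction rows with
  | nil => intro st _ _; rfl
  | cons r rows ih =>
    intro st h1 h2
    rw [List.foldl_cons, List.foldl_cons, pvGA_eq_GB m st r h1 (h2 r List.mem_cons_self)]
    refine ih (pvGB st r) ?_ ?_
    · show (List.zipWith (fun hv x => if x = 0 then hv + 1 else 0) st.1 r).length = m
      rw [List.length_zipWith, h1]
      have := h2 r List.mem_cons_self
      omega
    · intro r' hr'
      exact h2 r' (List.mem_cons_of_mem _ hr')

theorem pvA_closed (matrix : List (List Int)) (hg : ¬(matrix = [] ∨ matrix.headD [] = [])) :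
    max_rectangle_of_zero matrix = ((List.range matrix.length).foldl
      (fun st i => pvGA (matrix.headD []).length st (matrix.getD i []))
      (List.replicate (matrix.headD []).length 0, (0 : Int))).2 := by
  unfold max_rectangle_of_zero
  rw [if_neg hg]
  rfl

theorem pvB_closed (matrix : List (List Int)) (hg : ¬(matrix = [] ∨ matrix.headD [] = [])) :
    max_rectangle_of_zero_alt matrix = (matrix.foldl pvGB
      (List.replicate (matrix.headD []).length 0, (0 : Int))).2 := by
  unfold max_rectangle_of_zero_alt
  rw [if_neg hg]
  rfl

-- ===== VERDICT (by name: the statement is the Claim_ definition above) =====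
theorem max_rectangle_of_zero_spec : Claim_equal_max_rectangle_of_zero := by
  intro matrix _ hpre
  unfold Spec_max_rectangle_of_zero
  by_cases hg : matrix = [] ∨ matrix.headD [] = []
  · unfold max_rectangle_of_zero max_rectangle_of_zero_alt
    rw [if_pos hg, if_pos hg]
  · rw [pvA_closed matrix hg, pvB_closed matrix hg,
      pvFoldRange (pvGA (matrix.headD []).length) [] matrix _,
      pvRows (matrix.headD []).length matrix _ (by simp) hpre]
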